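-- pv_equiv track=rewrite | github.com/boomhacked/BrowserHunter | src/gui/widgets/dynamic_table.py | _detect_timestamp_columns
-- ===== SOURCE A (Python) =====
-- from typing import List, Dict, Any, Optional
--
-- def _detect_timestamp_columns(columns: List[str]) -> List[str]:
--     """
--     Detect which columns likely contain timestamps
--
--     Args:
--         columns: List of column names
--
--     Returns:
--         List of column names that likely contain timestamps
--     """
--     timestamp_keywords = [
--         'time', 'date', 'timestamp', 'visit', 'created', 'modified',
--         'updated', 'last', 'first', 'start', 'end', 'expire'
--     ]
--
--     timestamp_cols = []
--     for col in columns: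
--         col_lower = col.lower()
--         if any(keyword in col_lower for keyword in timestamp_keywords):
--             timestamp_cols.append(col)
--
--     return timestamp_cols
-- ===== SOURCE B (Python) =====
-- # B: keyword-major two-phase algorithm — for each keyword collect the set of
-- # matching column indices, then emit columns whose index was matched
-- # (transposed loop order; order-independence of the match set makes it exact).
-- _KEYWORDS = ['time', 'date', 'timestamp', 'visit', 'created', 'modified',
--              'updated', 'last', 'first', 'start', 'end', 'expire']
--
-- def _detect_timestamp_columns(columns):
--     matched = set()
--     for keyword in _KEYWORDS:
--         for i, col in enumerate(columns):
--             if keyword in col.lower():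
--                 matched.add(i)
--     return [col for i, col in enumerate(columns) if i in matched]
-- ===== Notes on version B (the rewrite author's own statement) =====
-- stated objective: alternative
-- what changed: B transposes the loop nesting: instead of scanning each column against all keywords (column-major with an any()), it runs keyword-major passes that accumulate a set of matched column indices, then emits columns whose index is in that set; equivalence holds because the matched-index set is order-independent.
import Mathlib
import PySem

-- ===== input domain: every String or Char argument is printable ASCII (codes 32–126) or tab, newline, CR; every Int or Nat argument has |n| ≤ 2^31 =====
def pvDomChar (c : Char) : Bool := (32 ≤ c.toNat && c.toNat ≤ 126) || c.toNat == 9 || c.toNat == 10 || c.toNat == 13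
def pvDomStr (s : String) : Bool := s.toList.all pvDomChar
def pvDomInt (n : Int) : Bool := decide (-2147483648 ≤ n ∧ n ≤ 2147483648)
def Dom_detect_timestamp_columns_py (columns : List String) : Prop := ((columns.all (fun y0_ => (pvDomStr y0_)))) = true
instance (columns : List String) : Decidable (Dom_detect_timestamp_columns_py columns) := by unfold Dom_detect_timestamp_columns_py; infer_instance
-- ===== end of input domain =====

-- B transposes the loops: keyword-major passes collect the set of matched column
-- indices, then a final pass emits columns whose index was matched (objective: alternative).

-- ===== PORT A =====
def pvKw : List String :=
  ["time", "date", "timestamp", "visit", "created", "modified",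
   "updated", "last", "first", "start", "end", "expire"]

def detect_timestamp_columns_py (columns : List String) : List String :=
  columns.foldl (fun timestamp_cols col =>
    let col_lower := PySem.Str.lower col
    if pvKw.any (fun keyword => PySem.Str.isIn keyword col_lower) then
      timestamp_cols ++ [col]
    else timestamp_cols) []

-- ===== PORT B =====
-- matched indices are consumed only through membership, so Set order never matters
def detect_timestamp_columns_py_alt (columns : List String) : List String :=
  let matched : PySem.Set Int :=
    pvKw.foldl (fun matched keyword =>
      (PySem.List.enumerate columns).foldl (fun matched p =>
        if PySem.Str.isIn keyword (PySem.Str.lower p.2) then PySem.Set.add matched p.1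
        else matched) matched) PySem.Set.empty
  ((PySem.List.enumerate columns).filter (fun p => PySem.Set.contains matched p.1)).map (·.2)

-- ===== PRECONDITION & SPEC =====
def Spec_detect_timestamp_columns_py (columns : List String) (out : List String) : Prop := out = detect_timestamp_columns_py_alt columns
instance (columns : List String) (out : List String) : Decidable (Spec_detect_timestamp_columns_py columns out) := by unfold Spec_detect_timestamp_columns_py; infer_instance

-- ===== CLAIM (what is proved, stated in full; the proofs are below) =====
def Claim_equal_detect_timestamp_columns_py : Prop := ∀ (columns : List String), Dom_detect_timestamp_columns_py columns → Spec_detect_timestamp_columns_py columns (detect_timestamp_columns_py columns)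

-- ===== LEMMAS AND PROOFS =====

-- membership after one conditional-add pass
theorem pv_mem_fold_add {α : Type} (q : Int × α → Bool) (l : List (Int × α))
    (m0 : PySem.Set Int) (x : Int) :
    (x ∈ l.foldl (fun m p => if q p then PySem.Set.add m p.1 else m) m0) ↔
      x ∈ m0 ∨ ∃ p ∈ l, q p ∧ x = p.1 := by
  induction l generalizing m0 with
  | nil => simp
  | cons hd tl ih =>
    simp only [List.foldl_cons, ih, List.mem_cons]
    by_cases hq : q hd <;> simp [hq, PySem.Set.mem_add] <;>
      tauto

-- membership in the full matched set
theorem pv_mem_matched {α : Type} (kws : List String) (q : String → Int × α → Bool)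
    (l : List (Int × α)) (m0 : PySem.Set Int) (x : Int) :
    (x ∈ kws.foldl (fun m kw =>
        l.foldl (fun m p => if q kw p then PySem.Set.add m p.1 else m) m) m0) ↔
      x ∈ m0 ∨ ∃ kw ∈ kws, ∃ p ∈ l, q kw p ∧ x = p.1 := by
  induction kws generalizing m0 with
  | nil => simp
  | cons hd tl ih =>
    simp only [List.foldl_cons, ih, pv_mem_fold_add, List.mem_cons]
    constructor
    · rintro ((h | h) | ⟨kw, hkw, h⟩)
      · exact Or.inl h
      · exact Or.inr ⟨hd, Or.inl rfl, h⟩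
      · exact Or.inr ⟨kw, Or.inr hkw, h⟩
    · rintro (h | ⟨kw, (rfl | hkw), h⟩)
      · exact Or.inl (Or.inl h)
      · exact Or.inl (Or.inr h)
      · exact Or.inr ⟨kw, hkw, h⟩

-- each pair of (enumerate columns) is determined by its index
theorem pv_enum_inj {α : Type} (xs : List α) (p p' : Int × α)
    (hp : p ∈ PySem.List.enumerate xs) (hp' : p' ∈ PySem.List.enumerate xs)
    (h : p.1 = p'.1) : p = p' := by
  rw [PySem.List.mem_enumerate_iff] at hp hp'
  obtain ⟨k, hk, rfl⟩ := hp
  obtain ⟨k', hk', rfl⟩ := hp'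
  simp only [zero_add] at h
  have : k = k' := by exact_mod_cast h
  subst this; rfl

-- dropping the index after filtering on the value only
theorem pv_filter_enum_map {α : Type} (q : α → Bool) (xs : List α) (s : Int) :
    (((PySem.List.enumerate xs s).filter (fun p => q p.2)).map (·.2)) = xs.filter q := by
  induction xs generalizing s with
  | nil => simp [PySem.List.enumerate_nil]
  | cons hd tl ih =>
    by_cases h : q hd <;>
      simp [PySem.List.enumerate_cons, h, ih]

-- ===== VERDICT (by name: the statement is the Claim_ definition above) =====
theorem detect_timestamp_columns_py_spec : Claim_equal_detect_timestamp_columns_py := by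
  intro columns _
  unfold Spec_detect_timestamp_columns_py detect_timestamp_columns_py
  simp only [detect_timestamp_columns_py_alt]
  rw [PySem.List.foldl_append_if_eq_filter, List.nil_append]
  rw [List.filter_congr (q := fun p : Int × String =>
        pvKw.any (fun keyword => PySem.Str.isIn keyword (PySem.Str.lower p.2)))
      (l := PySem.List.enumerate columns) ?_]
  · exact (pv_filter_enum_map _ columns 0).symm
  · intro p hp
    rw [Bool.eq_iff_iff, PySem.Set.contains_iff,
      pv_mem_matched pvKw (fun kw p => PySem.Str.isIn kw (PySem.Str.lower p.2))]
    simp only [PySem.Set.empty, List.not_mem_nil, false_or, List.any_eq_true]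
    constructor
    · rintro ⟨kw, hkw, p', hp', hq, hx⟩
      have := pv_enum_inj columns p p' hp hp' hx
      subst this; exact ⟨kw, hkw, hq⟩
    · rintro ⟨kw, hkw, hq⟩; exact ⟨kw, hkw, p, hp, hq, rfl⟩
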